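-- pv_equiv track=rewrite | github.com/rimiaziz66/pythoncode | CodingTest/addAllRemaining.py | addAllRemaining
-- ===== SOURCE A (Python) =====
-- def addAllRemaining(ls):
--     n=len(ls)
--     prefix= 0
--     suffix=0
--     result= [0]* n
--
--     for i in range(n):
--         result[i] = prefix
--         prefix += ls[i]
--
--     for j in range(n-1,-1,-1):
--         result[j] += suffix
--         suffix += ls[j]
--
--     return result
-- ===== SOURCE B (Python) =====
-- def addAllRemaining(ls):
--     total = sum(ls)
--     return [total - x for x in ls]
-- ===== Notes on version B (the rewrite author's own statement) =====
-- stated objective: faster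
-- what changed: Replaces A's two index loops (prefix pass forward, suffix pass backward over a preallocated result) by one global sum and a single subtraction pass [total - x for x in ls].
import Mathlib
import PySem

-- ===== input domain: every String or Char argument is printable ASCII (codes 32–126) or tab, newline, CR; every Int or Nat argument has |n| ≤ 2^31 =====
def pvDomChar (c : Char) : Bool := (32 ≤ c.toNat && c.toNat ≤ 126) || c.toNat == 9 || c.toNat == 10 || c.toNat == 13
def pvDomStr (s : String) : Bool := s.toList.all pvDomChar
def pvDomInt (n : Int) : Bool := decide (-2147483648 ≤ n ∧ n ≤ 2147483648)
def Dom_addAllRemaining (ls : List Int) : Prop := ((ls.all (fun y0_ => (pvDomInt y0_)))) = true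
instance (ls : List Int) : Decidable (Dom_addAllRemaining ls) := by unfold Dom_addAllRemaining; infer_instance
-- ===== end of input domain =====

-- B replaces A's forward prefix pass and backward suffix pass over a mutable result
-- with one global sum plus a single subtraction pass (objective: faster, constant-factor).

-- ===== PORT A =====
-- body of A's first loop: result[i] = prefix; prefix += ls[i]
def aarLoop1 (ls : List Int) (st : List Int × Int) (i : Int) : List Int × Int :=
  (st.1.set i.toNat st.2, st.2 + PySem.List.pyGetD ls i 0)

-- body of A's second loop: result[j] += suffix; suffix += ls[j]
def aarLoop2 (ls : List Int) (st : List Int × Int) (j : Int) : List Int × Int :=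
  (st.1.set j.toNat (PySem.List.pyGetD st.1 j 0 + st.2), st.2 + PySem.List.pyGetD ls j 0)

def addAllRemaining (ls : List Int) : List Int :=
  let n : Int := ls.length
  let result : List Int := List.replicate ls.length 0
  let st1 := (PySem.List.pyRange 0 n 1).foldl (aarLoop1 ls) (result, 0)
  let st2 := (PySem.List.pyRange (n - 1) (-1) (-1)).foldl (aarLoop2 ls) (st1.1, 0)
  st2.1

-- ===== PORT B =====
def addAllRemaining_alt (ls : List Int) : List Int :=
  let total := ls.sum
  ls.map (fun x => total - x)

-- ===== PRECONDITION & SPEC =====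
def Spec_addAllRemaining (ls : List Int) (out : List Int) : Prop := out = addAllRemaining_alt ls
instance (ls : List Int) (out : List Int) : Decidable (Spec_addAllRemaining ls out) := by unfold Spec_addAllRemaining; infer_instance

-- ===== CLAIM (what is proved, stated in full; the proofs are below) =====
def Claim_equal_addAllRemaining : Prop := ∀ (ls : List Int), Dom_addAllRemaining ls → Spec_addAllRemaining ls (addAllRemaining ls)

-- ===== LEMMAS AND PROOFS =====

-- first loop: writes the prefix sums into the slots and threads the running total
theorem aarLoop1_invariant (ls : List Int) (k : Nat) (hk : k ≤ ls.length) :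
    ∀ (r : List Int) (p : Int), r.length = ls.length →
      ((PySem.List.pyRange 0 (k : Int) 1).foldl (aarLoop1 ls) (r, p)).2
          = p + (ls.take k).sum ∧
      ((PySem.List.pyRange 0 (k : Int) 1).foldl (aarLoop1 ls) (r, p)).1.length = r.length ∧
      ∀ i : Nat, i < r.length →
        ((PySem.List.pyRange 0 (k : Int) 1).foldl (aarLoop1 ls) (r, p)).1.getD i 0
          = if i < k then p + (ls.take i).sum else r.getD i 0 := by
  induction k with
  | zero =>
    intro r p hr
    simp [PySem.List.pyRange_one_eq_nil]
  | succ k ih =>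
    intro r p hr
    have hk' : k ≤ ls.length := Nat.le_of_succ_le hk
    have hklt : k < ls.length := hk
    have hsplit : PySem.List.pyRange 0 ((k + 1 : Nat) : Int) 1
        = PySem.List.pyRange 0 (k : Int) 1 ++ [(k : Int)] := by
      have := PySem.List.pyRange_one_succ_right (a := 0) (b := (k : Int)) (by omega)
      push_cast
      exact this
    obtain ⟨h2, hlen, hget⟩ := ih hk' r p hr
    rw [hsplit, List.foldl_append]
    set out := (PySem.List.pyRange 0 (k : Int) 1).foldl (aarLoop1 ls) (r, p) with hout
    have hstep : aarLoop1 ls out (k : Int)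
        = (out.1.set k out.2, out.2 + PySem.List.pyGetD ls (k : Int) 0) := by
      simp [aarLoop1]
    have hgetk : PySem.List.pyGetD ls (k : Int) 0 = ls.getD k 0 := by
      simp [PySem.List.pyGetD_natCast]
    have hgetk' : ls.getD k 0 = ls[k]'hklt := List.getD_eq_getElem ls 0 hklt
    refine ⟨?_, ?_, ?_⟩
    · simp only [List.foldl_cons, List.foldl_nil, hstep, hgetk, hgetk', h2,
        List.sum_take_succ ls k hklt]
      ring
    · simp [hstep, hlen]
    · intro i hi
      simp only [List.foldl_cons, List.foldl_nil, hstep]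
      by_cases hik : i = k
      · subst hik
        have hilt : i < out.1.length := by omega
        have hset : (out.1.set i out.2).getD i 0 = out.2 := by
          simp [List.getD, hilt]
        rw [hset, h2]
        simp
      · have : (out.1.set k out.2).getD i 0 = out.1.getD i 0 := by
          simp [List.getD, List.getElem?_set_ne (Ne.symm hik)]
        rw [this, hget i hi]
        by_cases h5 : i < k
        · simp [h5, Nat.lt_succ_of_lt h5]
        · have h6 : ¬ i < k + 1 := by omega
          simp [h5, h6]

-- second loop: adds the running suffix sum to each slot, walking from the back
theorem aarLoop2_invariant (ls : List Int) (k : Nat) (hk : k ≤ ls.length) :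
    ∀ (r : List Int) (s : Int), r.length = ls.length →
      ((PySem.List.pyRange ((k : Int) - 1) (-1) (-1)).foldl (aarLoop2 ls) (r, s)).2
          = s + (ls.take k).sum ∧
      ((PySem.List.pyRange ((k : Int) - 1) (-1) (-1)).foldl (aarLoop2 ls) (r, s)).1.length = r.length ∧
      ∀ i : Nat, i < r.length →
        ((PySem.List.pyRange ((k : Int) - 1) (-1) (-1)).foldl (aarLoop2 ls) (r, s)).1.getD i 0
          = if i < k then r.getD i 0 + s + ((ls.take k).sum - (ls.take (i + 1)).sum)
            else r.getD i 0 := by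
  induction k with
  | zero =>
    intro r s hr
    simp [PySem.List.pyRange_neg_one_eq_nil]
  | succ k ih =>
    intro r s hr
    have hk' : k ≤ ls.length := Nat.le_of_succ_le hk
    have hklt : k < ls.length := hk
    have hsplit : PySem.List.pyRange (((k + 1 : Nat) : Int) - 1) (-1) (-1)
        = (k : Int) :: PySem.List.pyRange ((k : Int) - 1) (-1) (-1) := by
      have h0 : (((k + 1 : Nat) : Int)) - 1 = (k : Int) := by push_cast; ring
      rw [h0]
      exact PySem.List.pyRange_neg_one_cons (by omega)
    rw [hsplit, List.foldl_cons]
    have hgetk : PySem.List.pyGetD ls (k : Int) 0 = ls.getD k 0 := by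
      simp [PySem.List.pyGetD_natCast]
    have hgetrk : PySem.List.pyGetD r (k : Int) 0 = r.getD k 0 := by
      simp [PySem.List.pyGetD_natCast]
    have hstep : aarLoop2 ls (r, s) (k : Int)
        = (r.set k (r.getD k 0 + s), s + ls.getD k 0) := by
      simp [aarLoop2, hgetk, hgetrk]
    rw [hstep]
    have hr' : (r.set k (r.getD k 0 + s)).length = ls.length := by simp [hr]
    obtain ⟨h2, hlen, hget⟩ := ih hk' (r.set k (r.getD k 0 + s)) (s + ls.getD k 0) hr'
    have hsum : (ls.take (k + 1)).sum = (ls.take k).sum + ls.getD k 0 := by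
      rw [List.sum_take_succ ls k hklt, List.getD_eq_getElem ls 0 hklt]
    refine ⟨?_, ?_, ?_⟩
    · rw [h2, hsum]; ring
    · simp only [hlen]; simp [hr]
    · intro i hi
      have hi' : i < (r.set k (r.getD k 0 + s)).length := by simp [hi]
      rw [hget i hi']
      by_cases hik : i = k
      · subst hik
        have h1 : ¬ i < i := by omega
        have h2' : i < i + 1 := by omega
        have : (r.set i (r.getD i 0 + s)).getD i 0 = r.getD i 0 + s := by
          simp [List.getD, hi]
        simp only [h1, if_false, h2', if_true, this]
        ring_nf
      · have hne : (r.set k (r.getD k 0 + s)).getD i 0 = r.getD i 0 := by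
          simp [List.getD, List.getElem?_set_ne (Ne.symm hik)]
        rw [hne]
        by_cases h5 : i < k
        · have h6 : i < k + 1 := by omega
          simp only [h5, if_true, h6, hsum]
          ring
        · have h6 : ¬ i < k + 1 := by omega
          simp [h5, h6]

-- ===== VERDICT (by name: the statement is the Claim_ definition above) =====
theorem addAllRemaining_spec : Claim_equal_addAllRemaining := by
  unfold Claim_equal_addAllRemaining Spec_addAllRemaining
  intro ls _
  unfold addAllRemaining addAllRemaining_alt
  simp only []
  obtain ⟨_, hlen1, hget1⟩ :=
    aarLoop1_invariant ls ls.length le_rfl (List.replicate ls.length 0) 0 (by simp)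
  set r1 := ((PySem.List.pyRange 0 (ls.length : Int) 1).foldl (aarLoop1 ls)
      (List.replicate ls.length (0 : Int), 0)).1 with hr1
  have hr1len : r1.length = ls.length := by
    rw [hlen1]; simp
  obtain ⟨_, hlen2, hget2⟩ := aarLoop2_invariant ls ls.length le_rfl r1 0 hr1len
  apply List.ext_getElem
  · rw [hlen2, hr1len]; simp
  · intro i h1 h2
    have hi : i < ls.length := by
      rw [hlen2, hr1len] at h1; exact h1
    have hA := hget2 i (by omega)
    rw [List.getD_eq_getElem _ 0 h1] at hA
    rw [hA]
    have hB := hget1 i (by simpa using hi)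
    have hr1i : r1.getD i 0 = (ls.take i).sum := by
      rw [hB]
      simp [hi]
    have htk : ls.take ls.length = ls := by simp
    have hsum : (ls.take (i + 1)).sum = (ls.take i).sum + ls[i]'hi :=
      List.sum_take_succ ls i hi
    simp only [hi, if_true, hr1i, htk, hsum]
    have hmap : (ls.map (fun x => ls.sum - x))[i]'h2 = ls.sum - ls[i]'hi := by
      simp
    rw [hmap]
    ring
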